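-- pv_equiv track=rewrite | github.com/Trungtin1011/bitocading-spot | practice/base/codility.py | solution
-- ===== SOURCE A (Python) =====
-- def solution(A):
--     res = -1
--     if (
--         all(isinstance(ele, list) for ele in A)
--         and len(A) in range(1, 1001)
--         and len(A[0]) in range(1, 1001)
--         and min(map(min, A)) >= 1
--         and max(map(max, A)) <= len(A) * len(A[0])
--     ):
--         res = 0
--         arr = []
--         for item in A:
--             arr.extend(list(set(item)))
--         _arr = list(set(arr))
--
--         for item in _arr:
--             if arr.count(item) > 1:
--                 res += 1
--
--     return res
-- ===== SOURCE B (Python) =====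
-- def solution(A):
--     res = -1
--     if (
--         all(isinstance(ele, list) for ele in A)
--         and len(A) in range(1, 1001)
--         and len(A[0]) in range(1, 1001)
--         and min(map(min, A)) >= 1
--         and max(map(max, A)) <= len(A) * len(A[0])
--     ):
--         seen = set()
--         repeated = set()
--         for row in A:
--             for v in set(row):
--                 if v in seen:
--                     repeated.add(v)
--                 else:
--                     seen.add(v)
--         res = len(repeated)
--     return res
-- ===== Notes on version B (the rewrite author's own statement) =====
-- stated objective: alternative
-- what changed: Replaces the two-phase core (accumulate a flat list of per-row deduped values, then run arr.count over each distinct value) with a single streaming pass maintaining two sets, seen and repeated, answering len(repeated); the validation guard is kept verbatim, so both raise ValueError on an empty non-first row. (The guard caps rows at 1000, so the asymptotic gain is not measurable on the generated inputs.)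
import Mathlib
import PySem

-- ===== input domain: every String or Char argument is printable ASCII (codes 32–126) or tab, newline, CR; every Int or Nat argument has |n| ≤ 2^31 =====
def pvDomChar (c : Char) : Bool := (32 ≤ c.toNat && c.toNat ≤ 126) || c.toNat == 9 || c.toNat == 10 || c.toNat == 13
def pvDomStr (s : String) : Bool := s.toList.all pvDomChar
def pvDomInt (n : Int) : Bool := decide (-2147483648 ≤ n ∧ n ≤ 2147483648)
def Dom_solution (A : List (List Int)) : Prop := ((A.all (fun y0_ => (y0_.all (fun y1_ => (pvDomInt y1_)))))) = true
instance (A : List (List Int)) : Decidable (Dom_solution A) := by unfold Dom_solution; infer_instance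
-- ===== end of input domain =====

-- B changes the core to one streaming pass with 'seen'/'repeated' sets instead of
-- "flat list then arr.count per distinct value"; the validation guard is identical
-- in both, so both are partial in exactly the same places.

-- ===== PORT A =====
-- the guard expression, shared verbatim by both Pythons (min/max over an empty row
-- raise in Python; the .getD 0 totalisation there is excluded by Pre_solution)
def solutionGuard (A : List (List Int)) : Bool :=
  (A.all (fun _ => true))
  && decide (1 ≤ A.length ∧ A.length ≤ 1000)
  && decide (1 ≤ A.headI.length ∧ A.headI.length ≤ 1000)
  && decide (1 ≤ (PySem.List.min? (A.map (fun r => (PySem.List.min? r (fun x => x)).getD 0)) (fun x => x)).getD 0)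
  && decide ((PySem.List.max? (A.map (fun r => (PySem.List.max? r (fun x => x)).getD 0)) (fun x => x)).getD 0
              ≤ (A.length : Int) * (A.headI.length : Int))

def solution (A : List (List Int)) : Int :=
  if solutionGuard A then
    -- arr = []; for item in A: arr.extend(list(set(item)))
    let arr := A.foldl (fun acc row => acc ++ PySem.Set.ofList row) []
    -- _arr = list(set(arr))
    let uarr : PySem.Set Int := PySem.Set.ofList arr
    -- for item in _arr: if arr.count(item) > 1: res += 1
    uarr.foldl (fun res x => if PySem.List.count arr x > 1 then res + 1 else res) (0 : Int)
  else
    -1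

-- ===== PORT B =====
def solution_alt (A : List (List Int)) : Int :=
  if solutionGuard A then
    -- seen, repeated = set(), set(); one streaming pass over the rows
    let st := A.foldl
      (fun (st : PySem.Set Int × PySem.Set Int) row =>
        (PySem.Set.ofList row).foldl
          (fun st2 v =>
            if PySem.Set.contains st2.1 v then (st2.1, PySem.Set.add st2.2 v)
            else (PySem.Set.add st2.1 v, st2.2))
          st)
      (PySem.Set.empty, PySem.Set.empty)
    PySem.Set.len st.2
  else
    -1

-- ===== PRECONDITION & SPEC =====
-- Pre_ excludes exactly the inputs on which Python A raises (ValueError from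
-- min()/max() on an empty row, reached only once the length checks have passed).
def Pre_solution (A : List (List Int)) : Prop :=
  ¬ (1 ≤ A.length ∧ A.length ≤ 1000 ∧ 1 ≤ A.headI.length ∧ A.headI.length ≤ 1000 ∧ ∃ r ∈ A, r = [])
instance (A : List (List Int)) : Decidable (Pre_solution A) := by unfold Pre_solution; infer_instance
def pvWitness_solution : List (List Int) := [[1, 2], [2, 3]]
def Spec_solution (A : List (List Int)) (out : Int) : Prop := out = solution_alt A
instance (A : List (List Int)) (out : Int) : Decidable (Spec_solution A out) := by unfold Spec_solution; infer_instance

-- ===== CLAIM (what is proved, stated in full; the proofs are below) =====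
def Claim_equal_solution : Prop := ∀ (A : List (List Int)), Dom_solution A → Pre_solution A → Spec_solution A (solution A)

-- ===== LEMMAS AND PROOFS =====

-- A's flat accumulation is the flatten of the deduped rows
theorem pvA_arr_eq (A : List (List Int)) (acc : List Int) :
    A.foldl (fun acc row => acc ++ PySem.Set.ofList row) acc
      = acc ++ (A.map PySem.Set.ofList).flatten := by
  induction A generalizing acc with
  | nil => simp
  | cons a t ih => simp [List.foldl_cons, ih, List.append_assoc]

-- counting in the flat list = counting the rows that contain x
theorem pvA_count_eq (A : List (List Int)) (x : Int) :
    ((A.map PySem.Set.ofList).flatten).count x = A.countP (fun r => decide (x ∈ r)) := by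
  induction A with
  | nil => simp
  | cons a t ih =>
    simp only [List.map_cons, List.flatten_cons, List.count_append, ih, List.countP_cons]
    by_cases h : x ∈ a
    · rw [(PySem.Set.nodup_ofList a).count]
      simp [PySem.Set.mem_ofList, h, Nat.add_comm]
    · rw [(PySem.Set.nodup_ofList a).count]
      simp [PySem.Set.mem_ofList, h]

-- B's inner fold over one deduped row: membership description of seen/repeated
theorem pvB_inner (l : List Int) (hl : l.Nodup) :
    ∀ (s r : List Int), s.Nodup → r.Nodup →
    let res := l.foldl
      (fun (st2 : PySem.Set Int × PySem.Set Int) v =>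
        if PySem.Set.contains st2.1 v then (st2.1, PySem.Set.add st2.2 v)
        else (PySem.Set.add st2.1 v, st2.2)) (s, r)
    res.1.Nodup ∧ res.2.Nodup ∧
      (∀ x, x ∈ res.1 ↔ x ∈ s ∨ x ∈ l) ∧
      (∀ x, x ∈ res.2 ↔ x ∈ r ∨ (x ∈ l ∧ x ∈ s)) := by
  induction l with
  | nil => intro s r hs hr; exact ⟨hs, hr, by simp, by simp⟩
  | cons v t ih =>
    intro s r hs hr
    have hnv : v ∉ t := (List.nodup_cons.mp hl).1
    have ht : t.Nodup := (List.nodup_cons.mp hl).2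
    simp only [List.foldl_cons]
    by_cases hv : v ∈ s
    · rw [if_pos ((PySem.Set.contains_iff s v).mpr hv)]
      obtain ⟨h1, h2, h3, h4⟩ := ih ht s (PySem.Set.add r v) hs (PySem.Set.nodup_add r v hr)
      refine ⟨h1, h2, ?_, ?_⟩
      · intro x; rw [h3 x]
        constructor
        · rintro (h | h) <;> simp [h]
        · rintro (h | h)
          · exact Or.inl h
          · rcases List.mem_cons.mp h with h | h
            · exact Or.inl (h ▸ hv)
            · exact Or.inr h
      · intro x; rw [h4 x, PySem.Set.mem_add]
        constructor
        · rintro ((h | h) | ⟨h1', h2'⟩)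
          · exact Or.inl h
          · exact Or.inr ⟨by simp [h], h ▸ hv⟩
          · exact Or.inr ⟨List.mem_cons_of_mem v h1', h2'⟩
        · rintro (h | ⟨h1', h2'⟩)
          · exact Or.inl (Or.inl h)
          · rcases List.mem_cons.mp h1' with h | h
            · exact Or.inl (Or.inr h)
            · exact Or.inr ⟨h, h2'⟩
    · rw [if_neg (by simpa [PySem.Set.contains_iff] using hv)]
      obtain ⟨h1, h2, h3, h4⟩ := ih ht (PySem.Set.add s v) r (PySem.Set.nodup_add s v hs) hr
      refine ⟨h1, h2, ?_, ?_⟩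
      · intro x; rw [h3 x, PySem.Set.mem_add]
        constructor
        · rintro ((h | h) | h)
          · exact Or.inl h
          · exact Or.inr (by simp [h])
          · exact Or.inr (List.mem_cons_of_mem v h)
        · rintro (h | h)
          · exact Or.inl (Or.inl h)
          · rcases List.mem_cons.mp h with h | h
            · exact Or.inl (Or.inr h)
            · exact Or.inr h
      · intro x; rw [h4 x, PySem.Set.mem_add]
        constructor
        · rintro (h | ⟨hxt, hxs | hxv⟩)
          · exact Or.inl h
          · exact Or.inr ⟨List.mem_cons_of_mem v hxt, hxs⟩
          · exact absurd (hxv ▸ hxt) hnv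
        · rintro (h | ⟨hxl, hxs⟩)
          · exact Or.inl h
          · rcases List.mem_cons.mp hxl with h | h
            · exact absurd (h ▸ hxs) hv
            · exact Or.inr ⟨h, Or.inl hxs⟩

-- B's outer fold: 'repeated' holds exactly the values contained in ≥ 2 rows
theorem pvB_outer (A : List (List Int)) :
    ∀ (s r : List Int), s.Nodup → r.Nodup →
    let res := A.foldl
      (fun (st : PySem.Set Int × PySem.Set Int) row =>
        (PySem.Set.ofList row).foldl
          (fun st2 v =>
            if PySem.Set.contains st2.1 v then (st2.1, PySem.Set.add st2.2 v)
            else (PySem.Set.add st2.1 v, st2.2)) st) (s, r)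
    res.2.Nodup ∧
      (∀ x, x ∈ res.2 ↔ x ∈ r ∨ (x ∈ s ∧ 1 ≤ A.countP (fun row => decide (x ∈ row)))
        ∨ 2 ≤ A.countP (fun row => decide (x ∈ row))) := by
  induction A with
  | nil => intro s r hs hr; exact ⟨hr, by simp⟩
  | cons a t ih =>
    intro s r hs hr
    simp only [List.foldl_cons]
    obtain ⟨h1, h2, h3, h4⟩ := pvB_inner (PySem.Set.ofList a) (PySem.Set.nodup_ofList a) s r hs hr
    set st1 := (PySem.Set.ofList a).foldl
      (fun (st2 : PySem.Set Int × PySem.Set Int) v =>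
        if PySem.Set.contains st2.1 v then (st2.1, PySem.Set.add st2.2 v)
        else (PySem.Set.add st2.1 v, st2.2)) (s, r) with hst1
    obtain ⟨g1, g2⟩ := ih st1.1 st1.2 h1 h2
    refine ⟨by simpa using g1, ?_⟩
    intro x
    have hx := g2 x
    simp only [Prod.mk.eta] at hx
    rw [hx, h4 x, h3 x]
    simp only [PySem.Set.mem_ofList, List.countP_cons]
    set n := t.countP (fun row => decide (x ∈ row)) with hn
    by_cases ha : x ∈ a <;>
      by_cases hc1 : 1 ≤ n <;> by_cases hc2 : 2 ≤ n <;>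
      first
        | omega
        | (simp only [ha, decide_true, decide_false, if_true,
             hc1, hc2, show (1:ℕ) ≤ n + 1 from by omega,
             show (2 ≤ n + 1) ↔ (1 ≤ n) from by omega]
           tauto)

-- the streaming core equals the count-based core
theorem pvCore_eq (A : List (List Int)) :
    (let arr := A.foldl (fun acc row => acc ++ PySem.Set.ofList row) []
     let uarr : PySem.Set Int := PySem.Set.ofList arr
     uarr.foldl (fun res x => if PySem.List.count arr x > 1 then res + 1 else res) (0 : Int))
    = (let st := A.foldl
        (fun (st : PySem.Set Int × PySem.Set Int) row =>
          (PySem.Set.ofList row).foldl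
            (fun st2 v =>
              if PySem.Set.contains st2.1 v then (st2.1, PySem.Set.add st2.2 v)
              else (PySem.Set.add st2.1 v, st2.2))
            st)
        (PySem.Set.empty, PySem.Set.empty)
       PySem.Set.len st.2) := by
  simp only [pvA_arr_eq, List.nil_append]
  set arr := (A.map PySem.Set.ofList).flatten with harr
  rw [PySem.List.foldl_ite_add_one (fun x => PySem.List.count arr x > 1)]
  obtain ⟨hnd, hmem⟩ := pvB_outer A PySem.Set.empty PySem.Set.empty List.nodup_nil List.nodup_nil
  set st := A.foldl
        (fun (st : PySem.Set Int × PySem.Set Int) row =>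
          (PySem.Set.ofList row).foldl
            (fun st2 v =>
              if PySem.Set.contains st2.1 v then (st2.1, PySem.Set.add st2.2 v)
              else (PySem.Set.add st2.1 v, st2.2))
            st)
        (PySem.Set.empty, PySem.Set.empty) with hst
  -- both sides count the same set of values
  have hperm : List.Perm ((PySem.Set.ofList arr).filter (fun x => decide (PySem.List.count arr x > 1))) st.2 := by
    apply (List.perm_ext_iff_of_nodup (List.Nodup.filter _ (PySem.Set.nodup_ofList arr)) hnd).mpr
    intro x
    rw [List.mem_filter, hmem x, PySem.Set.mem_ofList]
    simp only [PySem.Set.empty, List.not_mem_nil, false_or, false_and]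
    constructor
    · rintro ⟨_, h⟩
      have : 1 < List.count x arr := by simpa [PySem.List.count] using of_decide_eq_true h
      have h2 := pvA_count_eq A x
      rw [← harr] at h2
      omega
    · intro h
      have hcnt : 1 < List.count x arr := by
        have h2 := pvA_count_eq A x
        rw [← harr] at h2
        omega
      refine ⟨List.count_pos_iff.mp (by omega), by simpa [PySem.List.count] using decide_eq_true hcnt⟩
  have hlen := hperm.length_eq
  rw [List.countP_eq_length_filter, hlen]
  simp [PySem.Set.len]

-- ===== VERDICT (by name: the statement is the Claim_ definition above) =====
theorem solution_spec : Claim_equal_solution := by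
  intro A _ _
  unfold Spec_solution solution solution_alt
  by_cases hg : solutionGuard A
  · simp only [hg, if_true]
    have h := pvCore_eq A
    simp only at h
    exact h
  · rw [if_neg hg, if_neg hg]
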